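-- pv_equiv track=rewrite | github.com/Gu-wop/T-414-AFLV | set_04/neumann/neumann.py | neumann_recursive
-- ===== SOURCE A (Python) =====
-- def neumann_recursive(n: int, sep=",") -> str:
--     if n == 0:
--         return "{}"
--
--     arr = []
--     for i in range(1, n + 1):
--         if i == n:
--             arr.append(neumann_recursive(n - 1, sep))
--         else:
--             arr.append("{" * i + "}" * i)
--     output = "{" + sep.join(arr) + "}"
--     return output
-- ===== SOURCE B (Python) =====
-- def neumann_recursive(n: int, sep=",") -> str:
--     prev = "{}"
--     for m in range(1, n + 1):
--         segs = ["{" * i + "}" * i for i in range(1, m)]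
--         segs.append(prev)
--         prev = "{" + sep.join(segs) + "}"
--     return prev
-- ===== Notes on version B (the rewrite author's own statement) =====
-- stated objective: simpler
-- what changed: Replaces A's recursion (which rebuilds the bracket segments at every level and recurses for the last slot) with an iterative bottom-up loop that keeps only the previous level's string and wraps it once per level.
import Mathlib
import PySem

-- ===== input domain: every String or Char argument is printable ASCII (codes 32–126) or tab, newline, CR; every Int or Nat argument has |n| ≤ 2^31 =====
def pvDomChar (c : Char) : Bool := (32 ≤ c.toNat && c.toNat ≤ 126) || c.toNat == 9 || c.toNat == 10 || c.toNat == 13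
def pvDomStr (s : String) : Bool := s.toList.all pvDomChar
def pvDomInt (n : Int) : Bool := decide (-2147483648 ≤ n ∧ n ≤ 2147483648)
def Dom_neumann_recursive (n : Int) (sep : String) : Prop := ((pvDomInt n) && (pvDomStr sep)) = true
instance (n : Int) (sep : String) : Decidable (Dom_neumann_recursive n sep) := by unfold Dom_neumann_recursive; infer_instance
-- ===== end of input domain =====

-- B replaces A's recursion with an iterative bottom-up loop keeping only the previous level's string (simpler, no recursion).

-- ===== PORT A =====
-- "{" * i  (Python string repetition, exact including i ≤ 0 → "")
def pvStrTimes (s : String) (i : Int) : String := String.ofList (PySem.List.pyRepeat s.toList i)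

-- fuel = n.toNat + 1 bounds the recursion depth exactly (the recursive call is only made for n ≥ 1, with argument n-1)
def neumannAux (fuel : Nat) (n : Int) (sep : String) : String :=
  match fuel with
  | 0 => "{}"  -- never reached for fuel = n.toNat + 1
  | fuel' + 1 =>
    if n == 0 then "{}"
    else
      let arr := (PySem.List.pyRange 1 (n + 1) 1).foldl
        (fun acc i =>
          if i == n then acc ++ [neumannAux fuel' (n - 1) sep]
          else acc ++ [pvStrTimes "{" i ++ pvStrTimes "}" i]) []
      "{" ++ PySem.Str.join sep arr ++ "}"

def neumann_recursive (n : Int) (sep : String) : String := neumannAux (n.toNat + 1) n sep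

-- ===== PORT B =====
def neumannStep (sep : String) (prev : String) (m : Int) : String :=
  let segs := (PySem.List.pyRange 1 m 1).map (fun i => pvStrTimes "{" i ++ pvStrTimes "}" i)
  "{" ++ PySem.Str.join sep (segs ++ [prev]) ++ "}"

def neumann_recursive_alt (n : Int) (sep : String) : String :=
  (PySem.List.pyRange 1 (n + 1) 1).foldl (neumannStep sep) "{}"

-- ===== PRECONDITION & SPEC =====
def Spec_neumann_recursive (n : Int) (sep : String) (out : String) : Prop := out = neumann_recursive_alt n sep
instance (n : Int) (sep : String) (out : String) : Decidable (Spec_neumann_recursive n sep out) := by unfold Spec_neumann_recursive; infer_instance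

-- ===== CLAIM (what is proved, stated in full; the proofs are below) =====
def Claim_equal_neumann_recursive : Prop := ∀ (n : Int) (sep : String), Dom_neumann_recursive n sep → Spec_neumann_recursive n sep (neumann_recursive n sep)

-- ===== LEMMAS AND PROOFS =====

-- B on n ≤ 0 is "{}"
theorem alt_nonpos (n : Int) (sep : String) (h : n ≤ 0) : neumann_recursive_alt n sep = "{}" := by
  unfold neumann_recursive_alt
  rw [PySem.List.pyRange_one_eq_nil (by omega)]
  rfl

-- B peels its last loop iteration
theorem alt_succ (n : Int) (sep : String) (h : 1 ≤ n) :
    neumann_recursive_alt n sep = neumannStep sep (neumann_recursive_alt (n - 1) sep) n := by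
  unfold neumann_recursive_alt
  rw [show n + 1 = (n - 1 + 1) + 1 by ring, PySem.List.pyRange_one_succ_right (by omega),
      List.foldl_append]
  simp

-- a loop appending 'rec' at i = n and g i elsewhere, over a list avoiding n, is a map
theorem foldl_if_ne (n : Int) (rec : String) (g : Int → String) (l : List Int)
    (hl : ∀ i ∈ l, i ≠ n) (acc : List String) :
    l.foldl (fun acc i => if i = n then acc ++ [rec] else acc ++ [g i]) acc = acc ++ l.map g := by
  induction l generalizing acc with
  | nil => simp
  | cons x xs ihx =>
    have hx : x ≠ n := hl x (List.mem_cons_self)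
    simp only [List.foldl_cons, if_neg hx, List.map_cons]
    rw [ihx (fun i hi => hl i (List.mem_cons_of_mem _ hi))]
    simp

-- main invariant: with enough fuel, the A-side recursion computes the B-side loop
theorem aux_eq_alt (fuel : Nat) (n : Int) (sep : String) (hf : n.toNat < fuel) :
    neumannAux fuel n sep = neumann_recursive_alt n sep := by
  induction fuel generalizing n with
  | zero => omega
  | succ f ih =>
    unfold neumannAux
    by_cases h0 : n = 0
    · subst h0
      simp [alt_nonpos 0 sep le_rfl]
    · simp only [beq_iff_eq, h0, if_false]
      by_cases hneg : n < 0
      · rw [PySem.List.pyRange_one_eq_nil (by omega), alt_nonpos n sep (by omega)]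
        simp [PySem.Str.join]
      · -- n ≥ 1
        have h1 : 1 ≤ n := by omega
        have hsplit : PySem.List.pyRange 1 (n + 1) 1 = PySem.List.pyRange 1 n 1 ++ [n] := by
          rw [show n + 1 = (n - 1 + 1) + 1 by ring, PySem.List.pyRange_one_succ_right (by omega)]
          simp
        rw [hsplit, List.foldl_append, alt_succ n sep h1, neumannStep,
            foldl_if_ne n (neumannAux f (n - 1) sep)
              (fun i => pvStrTimes "{" i ++ pvStrTimes "}" i) (PySem.List.pyRange 1 n 1)
              (by intro i hi
                  have := (PySem.List.mem_pyRange_one.mp hi).2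
                  omega) []]
        simp [ih (n - 1) (by omega)]

-- ===== VERDICT (by name: the statement is the Claim_ definition above) =====
theorem neumann_recursive_spec : Claim_equal_neumann_recursive := by
  intro n sep _
  unfold Spec_neumann_recursive neumann_recursive
  exact aux_eq_alt _ n sep (by omega)
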